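-- pv_equiv track=rewrite | github.com/pipieter/d20distribution | d20distribution/parser.py | get_reroll_dice_possibilities
-- ===== SOURCE A (Python) =====
-- DiscreteKey = tuple[int, ...]
--
-- def get_reroll_dice_possibilities(dice: DiscreteKey, sides: int, category: str | None, num: int) -> list[DiscreteKey]:
--     if len(dice) == 0:
--         return [()]
--
--     # Handle h and l separately, as they depend on the dice ordering
--     if category in ["h", "l"]:
--         if num <= 0:
--             return [dice]
--
--         if category == "h":
--             dice = tuple(sorted(dice, reverse=True))
--         else:
--             dice = tuple(sorted(dice, reverse=False))
--
--         _, *rest = dice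
--         combinations = get_reroll_dice_possibilities(tuple(rest), sides, category, num - 1)
--         outcomes: list[DiscreteKey] = []
--
--         for combination in combinations:
--             for roll in range(1, sides + 1):
--                 outcomes.append((roll,) + combination)
--
--         return outcomes
--
--     first, *rest = dice
--     combinations = get_reroll_dice_possibilities(tuple(rest), sides, category, num)
--     outcomes = []
--
--     if (category is None and first == num) or (category == ">" and first > num) or (category == "<" and first < num):
--         for combination in combinations:
--             for roll in range(1, sides + 1):
--                 outcomes.append((roll,) + combination)
--     else:
--         for combination in combinations:
--             outcomes.append((first,) + combination)
--
--     return outcomes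
-- ===== SOURCE B (Python) =====
-- def get_reroll_dice_possibilities(dice, sides, category, num):
--     if len(dice) == 0:
--         return [()]
--     if category in ("h", "l"):
--         if num <= 0:
--             return [dice]
--         base = sorted(dice, reverse=(category == "h"))
--         k = min(num, len(base))
--         flags = [i < k for i in range(len(base))]
--     else:
--         base = list(dice)
--         if category is None:
--             flags = [v == num for v in base]
--         elif category == ">":
--             flags = [v > num for v in base]
--         elif category == "<":
--             flags = [v < num for v in base]
--         else:
--             flags = [False] * len(base)
--     outcomes = [()]
--     for value, rerolled in zip(reversed(base), reversed(flags)):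
--         rng = range(1, sides + 1) if rerolled else (value,)
--         outcomes = [(r,) + c for c in outcomes for r in rng]
--     return outcomes
-- ===== Notes on version B (the rewrite author's own statement) =====
-- stated objective: alternative
-- what changed: A recurses over the dice, re-sorting the remaining dice at every h/l recursion level and re-testing the category inside each call; B computes each position's reroll flag once up front (one sort for h/l, one predicate map otherwise) and builds all outcomes with a single right-to-left expansion fold over the (value, flag) pairs.
import Mathlib
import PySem

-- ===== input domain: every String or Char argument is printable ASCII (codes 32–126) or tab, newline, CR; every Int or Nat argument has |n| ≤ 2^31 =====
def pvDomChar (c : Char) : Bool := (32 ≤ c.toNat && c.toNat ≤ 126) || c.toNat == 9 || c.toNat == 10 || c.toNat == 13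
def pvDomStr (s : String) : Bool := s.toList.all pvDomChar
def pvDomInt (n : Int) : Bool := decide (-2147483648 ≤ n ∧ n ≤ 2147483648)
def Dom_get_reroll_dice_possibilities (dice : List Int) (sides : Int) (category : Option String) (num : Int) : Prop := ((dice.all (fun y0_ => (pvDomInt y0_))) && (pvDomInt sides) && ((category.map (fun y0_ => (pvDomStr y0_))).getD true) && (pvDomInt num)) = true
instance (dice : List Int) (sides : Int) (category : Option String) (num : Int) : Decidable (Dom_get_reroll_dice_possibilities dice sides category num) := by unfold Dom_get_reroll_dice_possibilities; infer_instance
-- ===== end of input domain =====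

-- B replaces A's recursion (which re-sorts at every level) by computing every position's
-- reroll flag once and expanding the outcome list with a single fold; same values, same order.

-- ===== PORT A =====
-- literal transliteration of A's recursion; the nested append loops over
-- combinations × range(1, sides+1) become a flatMap over the same values in the same order
def get_reroll_dice_possibilities (dice : List Int) (sides : Int) (category : Option String) (num : Int) : List (List Int) :=
  match dice with
  | [] => [[]]
  | first :: restO =>
    if category = some "h" ∨ category = some "l" then
      if num ≤ 0 then [first :: restO]
      else
        let d := if category = some "h"
          then PySem.List.sorted (first :: restO) (fun x => x) true
          else PySem.List.sorted (first :: restO) (fun x => x) false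
        let rest := d.tail
        let combinations := get_reroll_dice_possibilities rest sides category (num - 1)
        combinations.flatMap (fun c => (PySem.List.pyRange 1 (sides + 1) 1).map (fun r => r :: c))
    else
      let combinations := get_reroll_dice_possibilities restO sides category num
      if (category = none ∧ first = num) ∨ (category = some ">" ∧ first > num) ∨ (category = some "<" ∧ first < num) then
        combinations.flatMap (fun c => (PySem.List.pyRange 1 (sides + 1) 1).map (fun r => r :: c))
      else
        combinations.map (fun c => first :: c)
termination_by dice.length
decreasing_by
  · simp only [List.length_tail]
    split <;> simp [PySem.List.length_sorted]
  · simp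

-- ===== PORT B =====
-- B's expansion loop over reversed(base)/reversed(flags): a foldr over the zipped list
def pvFold (sides : Int) (pairs : List (Int × Bool)) : List (List Int) :=
  pairs.foldr
    (fun vf acc => acc.flatMap (fun c =>
      (if vf.2 then PySem.List.pyRange 1 (sides + 1) 1 else [vf.1]).map (fun r => r :: c)))
    [[]]

def get_reroll_dice_possibilities_alt (dice : List Int) (sides : Int) (category : Option String) (num : Int) : List (List Int) :=
  if dice = [] then [[]]
  else if category = some "h" ∨ category = some "l" then
    if num ≤ 0 then [dice]
    else
      let base := PySem.List.sorted dice (fun x => x) (category == some "h")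
      let k := min num (base.length : Int)
      let flags := (List.range base.length).map (fun (i : Nat) => decide ((i : Int) < k))
      pvFold sides (base.zip flags)
  else
    let flags :=
      if category = none then dice.map (fun v => decide (v = num))
      else if category = some ">" then dice.map (fun v => decide (v > num))
      else if category = some "<" then dice.map (fun v => decide (v < num))
      else List.replicate dice.length false
    pvFold sides (dice.zip flags)

-- ===== PRECONDITION & SPEC =====
def Spec_get_reroll_dice_possibilities (dice : List Int) (sides : Int) (category : Option String) (num : Int) (out : List (List Int)) : Prop := out = get_reroll_dice_possibilities_alt dice sides category num
instance (dice : List Int) (sides : Int) (category : Option String) (num : Int) (out : List (List Int)) : Decidable (Spec_get_reroll_dice_possibilities dice sides category num out) := by unfold Spec_get_reroll_dice_possibilities; infer_instance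

-- ===== CLAIM (what is proved, stated in full; the proofs are below) =====
def Claim_equal_get_reroll_dice_possibilities : Prop := ∀ (dice : List Int) (sides : Int) (category : Option String) (num : Int), Dom_get_reroll_dice_possibilities dice sides category num → Spec_get_reroll_dice_possibilities dice sides category num (get_reroll_dice_possibilities dice sides category num)

-- ===== LEMMAS AND PROOFS =====

lemma pvFold_cons (sides : Int) (p : Int × Bool) (ps : List (Int × Bool)) :
    pvFold sides (p :: ps) = (pvFold sides ps).flatMap (fun c =>
      (if p.2 then PySem.List.pyRange 1 (sides + 1) 1 else [p.1]).map (fun r => r :: c)) := rfl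

lemma pvFold_all_false (sides : Int) (ps : List (Int × Bool)) (h : ∀ p ∈ ps, p.2 = false) :
    pvFold sides ps = [ps.map Prod.fst] := by
  induction ps with
  | nil => rfl
  | cons p t ih =>
    rw [pvFold_cons, ih (fun q hq => h q (List.mem_cons_of_mem _ hq)), h p List.mem_cons_self]
    simp

-- abbreviation for A's `sorted(dice, reverse=…)` choice, used only in the proofs below
def pvSortA (category : Option String) (dice : List Int) : List Int :=
  if category = some "h"
    then PySem.List.sorted dice (fun x => x) true
    else PySem.List.sorted dice (fun x => x) false

lemma pvSortA_beq (category : Option String) (dice : List Int) :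
    PySem.List.sorted dice (fun x => x) (category == some "h") = pvSortA category dice := by
  by_cases h : category = some "h"
  · simp [pvSortA, h]
  · rw [show (category == some "h") = false from beq_eq_false_iff_ne.mpr h]
    simp [pvSortA, h]

lemma A_hl_pos (sides num : Int) (category : Option String)
    (hc : category = some "h" ∨ category = some "l") (hnum : ¬ num ≤ 0) (x : Int) (t : List Int) :
    get_reroll_dice_possibilities (x :: t) sides category num =
      (get_reroll_dice_possibilities ((pvSortA category (x :: t)).tail) sides category (num - 1)).flatMap
        (fun c => (PySem.List.pyRange 1 (sides + 1) 1).map (fun r => r :: c)) := by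
  rw [get_reroll_dice_possibilities, if_pos hc, if_neg hnum, pvSortA]

lemma pvSortA_idem (category : Option String) (dice : List Int) :
    pvSortA category (pvSortA category dice) = pvSortA category dice := by
  by_cases h : category = some "h" <;>
    simp [pvSortA, h, PySem.List.sorted_sorted, PySem.List.sorted_rev_sorted_rev]

lemma pvSortA_tail_fix (category : Option String) (x : Int) (t : List Int)
    (hfix : pvSortA category (x :: t) = x :: t) : pvSortA category t = t := by
  by_cases h : category = some "h"
  · simp only [pvSortA, if_pos h] at hfix ⊢
    apply PySem.List.sorted_rev_eq_self_of_pairwise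
    have hp : (x :: t).Pairwise (fun a b => (fun y : Int => y) b ≤ (fun y : Int => y) a) := by
      rw [← hfix]; exact PySem.List.sorted_pairwise_rev _ _
    exact hp.of_cons
  · simp only [pvSortA, if_neg h] at hfix ⊢
    apply PySem.List.sorted_eq_self_of_pairwise
    have hp : (x :: t).Pairwise (fun a b => (fun y : Int => y) a ≤ (fun y : Int => y) b) := by
      rw [← hfix]; exact PySem.List.sorted_pairwise _ _
    exact hp.of_cons

-- the h/l branch of A on a list that sorting leaves unchanged rerolls the first
-- min(num, len) positions
lemma hl_branch (sides : Int) (category : Option String)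
    (hc : category = some "h" ∨ category = some "l") :
    ∀ (d : List Int) (num : Int), pvSortA category d = d →
      get_reroll_dice_possibilities d sides category num =
        pvFold sides (d.zip ((List.range d.length).map
          (fun (i : Nat) => decide ((i : Int) < min num (d.length : Int))))) := by
  intro d
  induction d with
  | nil => intro num _; rw [get_reroll_dice_possibilities]; rfl
  | cons x t ih =>
    intro num hfix
    by_cases hnum : num ≤ 0
    · rw [get_reroll_dice_possibilities, if_pos hc, if_pos hnum]
      rw [pvFold_all_false]
      · congr 1
        have hlen : (x :: t).length ≤ ((List.range (x :: t).length).map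
            (fun (i : Nat) => decide ((i : Int) < min num ((x :: t).length : Int)))).length := by simp
        rw [List.map_fst_zip hlen]
      · intro p hp
        have h2 := (List.of_mem_zip hp).2
        simp only [List.mem_map] at h2
        obtain ⟨i, _, hi⟩ := h2
        rw [← hi]
        simp only [decide_eq_false_iff_not, not_lt]
        exact le_trans (le_trans (min_le_left _ _) hnum) (Int.natCast_nonneg i)
    · rw [A_hl_pos sides num category hc hnum, hfix, List.tail_cons,
        ih (num - 1) (pvSortA_tail_fix category x t hfix)]
      have hflags : (List.range (x :: t).length).map
          (fun (i : Nat) => decide ((i : Int) < min num ((x :: t).length : Int)))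
          = true :: (List.range t.length).map
              (fun (i : Nat) => decide ((i : Int) < min (num - 1) (t.length : Int))) := by
        rw [show (x :: t).length = t.length + 1 from rfl, List.range_succ_eq_map, List.map_cons,
          List.map_map]
        refine congrArg₂ _ ?_ ?_
        · refine decide_eq_true ?_
          rw [lt_min_iff]
          constructor <;> [omega; exact_mod_cast Nat.succ_pos t.length]
        · refine List.map_congr_left (fun i _ => ?_)
          simp only [Function.comp_apply, decide_eq_decide, lt_min_iff]
          push_cast
          omega
      rw [hflags, List.zip_cons_cons, pvFold_cons]
      simp
-- the non-h/l branch of A: every position's reroll flag depends only on its own value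
lemma gen_branch (sides num : Int) (category : Option String)
    (hc : ¬(category = some "h" ∨ category = some "l")) (f : Int → Bool)
    (hf : ∀ v : Int,
      ((category = none ∧ v = num) ∨ (category = some ">" ∧ v > num) ∨ (category = some "<" ∧ v < num)) ↔ f v = true) :
    ∀ dice : List Int,
      get_reroll_dice_possibilities dice sides category num = pvFold sides (dice.zip (dice.map f)) := by
  intro dice
  induction dice with
  | nil => rw [get_reroll_dice_possibilities]; rfl
  | cons first rest ih =>
    rw [get_reroll_dice_possibilities, if_neg hc]
    simp only [List.map_cons, List.zip_cons_cons, pvFold_cons, ← ih]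
    by_cases hcond : ((category = none ∧ first = num) ∨ (category = some ">" ∧ first > num) ∨ (category = some "<" ∧ first < num))
    · rw [if_pos hcond]
      have hft : f first = true := (hf first).mp hcond
      simp [hft]
    · rw [if_neg hcond]
      have hff : f first = false := by
        rcases hv : f first with _ | _
        · rfl
        · exact absurd ((hf first).mpr hv) hcond
      simp only [hff, Bool.false_eq_true, if_false]
      generalize get_reroll_dice_possibilities rest sides category num = L
      induction L with
      | nil => rfl
      | cons a l ihL => simp [ihL]

-- ===== VERDICT (by name: the statement is the Claim_ definition above) =====
theorem get_reroll_dice_possibilities_spec : Claim_equal_get_reroll_dice_possibilities := by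
  intro dice sides category num _
  unfold Spec_get_reroll_dice_possibilities
  by_cases hnil : dice = []
  · subst hnil
    rw [get_reroll_dice_possibilities, get_reroll_dice_possibilities_alt]
    simp
  by_cases hc : category = some "h" ∨ category = some "l"
  · obtain ⟨x, t, rfl⟩ : ∃ x t, dice = x :: t := by
      cases dice with
      | nil => exact absurd rfl hnil
      | cons a b => exact ⟨a, b, rfl⟩
    by_cases hnum : num ≤ 0
    · rw [get_reroll_dice_possibilities, if_pos hc, if_pos hnum,
        get_reroll_dice_possibilities_alt, if_neg hnil, if_pos hc, if_pos hnum]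
    · rw [get_reroll_dice_possibilities_alt, if_neg hnil, if_pos hc, if_neg hnum]
      simp only [pvSortA_beq]
      have hfixb : pvSortA category (pvSortA category (x :: t)) = pvSortA category (x :: t) :=
        pvSortA_idem category (x :: t)
      have hbne : pvSortA category (x :: t) ≠ [] := by
        by_cases h : category = some "h" <;>
          simp [pvSortA, h, PySem.List.sorted_eq_nil_iff]
      have h2 : get_reroll_dice_possibilities (pvSortA category (x :: t)) sides category num =
          (get_reroll_dice_possibilities ((pvSortA category (x :: t)).tail) sides category (num - 1)).flatMap
            (fun c => (PySem.List.pyRange 1 (sides + 1) 1).map (fun r => r :: c)) := by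
        cases hB : pvSortA category (x :: t) with
        | nil => exact absurd hB hbne
        | cons b0 bt =>
          rw [A_hl_pos sides num category hc hnum b0 bt, ← hB, hfixb]
      rw [A_hl_pos sides num category hc hnum x t, ← h2,
        hl_branch sides category hc (pvSortA category (x :: t)) num hfixb]
  · rw [get_reroll_dice_possibilities_alt, if_neg hnil, if_neg hc]
    rcases category with _ | s
    · rw [if_pos rfl, gen_branch sides num none hc (fun v => decide (v = num)) (by simp) dice]
    · have hn : (some s : Option String) ≠ none := by simp
      by_cases hgt : s = ">"
      · subst hgt
        rw [if_neg hn, if_pos rfl,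
          gen_branch sides num (some ">") hc (fun v => decide (v > num)) (by simp) dice]
      · by_cases hlt : s = "<"
        · subst hlt
          rw [if_neg hn, if_neg (by simp), if_pos rfl,
            gen_branch sides num (some "<") hc (fun v => decide (v < num)) (by simp) dice]
        · rw [if_neg hn, if_neg (by simp [hgt]), if_neg (by simp [hlt]),
            gen_branch sides num (some s) hc (fun _ => false) (by simp [hgt, hlt]) dice]
          congr 1
          rw [List.map_const']
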